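-- pv_equiv track=rewrite | github.com/rowieg/advent-of-code-23 | days/fourteen.py | calculate_stone_sum
-- ===== SOURCE A (Python) =====
-- def calculate_stone_sum(stone_index: list, rolling_stones: list, table_length: int):
--   if len(rolling_stones) < 1:
--     return None
--
--   part_1 = sum([(table_length-entry) for entry in range(0,rolling_stones[0])])
--
--   part_2 = 0
--
--   for e, stone in enumerate(stone_index):
--     if e+1 < len(rolling_stones):
--       partial_sum_list = []
--       for entry in range(1,rolling_stones[e+1]+1):
--         partial_sum_list.append(table_length-entry-stone+1)
--       partial_sum = sum(partial_sum_list)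
--       part_2 = part_2 + partial_sum
--   return part_1 + part_2
-- ===== SOURCE B (Python) =====
-- def calculate_stone_sum(stone_index: list, rolling_stones: list, table_length: int):
--     if not rolling_stones:
--         return None
--     total = 0
--     for stone, count in zip([0] + stone_index, rolling_stones):
--         if count > 0:
--             total += count * (table_length - stone + 1) - count * (count + 1) // 2
--     return total
-- ===== Notes on version B (the rewrite author's own statement) =====
-- stated objective: faster
-- what changed: Replaced the per-stone inner range loops (building and summing a list of length rolling_stones[i]) by the closed-form triangular-number formula for each arithmetic series, folded into one zip pass.
import Mathlib
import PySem

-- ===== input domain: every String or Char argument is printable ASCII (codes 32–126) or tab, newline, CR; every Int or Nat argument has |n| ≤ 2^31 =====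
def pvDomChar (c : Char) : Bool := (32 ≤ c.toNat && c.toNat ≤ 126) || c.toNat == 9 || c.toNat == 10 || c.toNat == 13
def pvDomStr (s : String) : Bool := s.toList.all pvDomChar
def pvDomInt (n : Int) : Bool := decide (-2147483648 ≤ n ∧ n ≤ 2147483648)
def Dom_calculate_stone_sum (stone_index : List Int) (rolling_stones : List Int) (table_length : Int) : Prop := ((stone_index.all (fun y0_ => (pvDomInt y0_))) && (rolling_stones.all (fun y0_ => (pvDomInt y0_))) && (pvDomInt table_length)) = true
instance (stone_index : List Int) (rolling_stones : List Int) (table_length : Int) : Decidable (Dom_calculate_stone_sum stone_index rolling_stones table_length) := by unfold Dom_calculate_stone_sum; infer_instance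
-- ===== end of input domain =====

-- B replaces A's inner range loops by closed-form triangular-number sums in one zip pass (faster).

-- ===== PORT A =====
def calculate_stone_sum (stone_index : List Int) (rolling_stones : List Int) (table_length : Int) : Option Int :=
  if rolling_stones.length < 1 then none
  else
    -- part_1 = sum([(table_length-entry) for entry in range(0, rolling_stones[0])])
    let part_1 : Int :=
      ((PySem.List.pyRange 0 (PySem.List.pyGetD rolling_stones 0 0) 1).map
        (fun entry => table_length - entry)).sum
    -- for e, stone in enumerate(stone_index): …
    let part_2 : Int :=
      (PySem.List.enumerate stone_index 0).foldl
        (fun p2 p =>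
          if p.1 + 1 < (rolling_stones.length : Int) then
            let partial_sum_list :=
              (PySem.List.pyRange 1 (PySem.List.pyGetD rolling_stones (p.1 + 1) 0 + 1) 1).foldl
                (fun l entry => l ++ [table_length - entry - p.2 + 1]) []
            p2 + partial_sum_list.sum
          else p2) 0
    some (part_1 + part_2)

-- ===== PORT B =====
def calculate_stone_sum_alt (stone_index : List Int) (rolling_stones : List Int) (table_length : Int) : Option Int :=
  if rolling_stones = [] then none
  else
    some ((List.zip (0 :: stone_index) rolling_stones).foldl
      (fun total p =>
        if p.2 > 0 then
          total + p.2 * (table_length - p.1 + 1) - PySem.Int.floordiv (p.2 * (p.2 + 1)) 2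
        else total) 0)

-- ===== PRECONDITION & SPEC =====
def Spec_calculate_stone_sum (stone_index : List Int) (rolling_stones : List Int) (table_length : Int) (out : Option Int) : Prop := out = calculate_stone_sum_alt stone_index rolling_stones table_length
instance (stone_index : List Int) (rolling_stones : List Int) (table_length : Int) (out : Option Int) : Decidable (Spec_calculate_stone_sum stone_index rolling_stones table_length out) := by unfold Spec_calculate_stone_sum; infer_instance

-- ===== CLAIM (what is proved, stated in full; the proofs are below) =====
def Claim_equal_calculate_stone_sum : Prop := ∀ (stone_index : List Int) (rolling_stones : List Int) (table_length : Int), Dom_calculate_stone_sum stone_index rolling_stones table_length → Spec_calculate_stone_sum stone_index rolling_stones table_length (calculate_stone_sum stone_index rolling_stones table_length)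

-- ===== LEMMAS AND PROOFS =====

-- triangular-number step: T(m+1) = T(m) + (m+1)
theorem pv_tri_step (m : Nat) : (m + 1) * (m + 2) / 2 = m * (m + 1) / 2 + (m + 1) := by
  obtain ⟨x, hx⟩ := (Nat.even_mul_succ_self m).two_dvd
  obtain ⟨y, hy⟩ := (Nat.even_mul_succ_self (m + 1)).two_dvd
  have hy2 : (m + 1) * (m + 2) = 2 * y := by rw [← hy]
  have h3 : (m + 1) * (m + 2) = m * (m + 1) + 2 * (m + 1) := by ring
  rw [hx, hy2] at h3
  rw [hx, hy2]
  omega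

-- closed form of sum_{e=1}^{m} (c - e)
theorem pv_sum_tri (m : Nat) (c : Int) :
    ((PySem.List.pyRange 1 (1 + (m : Int)) 1).map (fun e => c - e)).sum
      = (m : Int) * c - ((m * (m + 1) / 2 : Nat) : Int) := by
  induction m with
  | zero => simp [PySem.List.pyRange_one_eq_nil (by omega : (1 : Int) ≤ 1)]
  | succ n ih =>
    have h : PySem.List.pyRange 1 (1 + ((n + 1 : Nat) : Int)) 1
        = PySem.List.pyRange 1 (1 + (n : Int)) 1 ++ [1 + (n : Int)] := by
      have := PySem.List.pyRange_one_succ_right (a := 1) (b := 1 + (n : Int)) (by omega)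
      rw [show (1 + ((n + 1 : Nat) : Int)) = 1 + (n : Int) + 1 by push_cast; ring, this]
    rw [h]
    simp only [List.map_append, List.sum_append, ih, List.map_cons, List.map_nil,
      List.sum_cons, List.sum_nil]
    have hstep : (((n + 1) * (n + 1 + 1) / 2 : Nat) : Int)
        = ((n * (n + 1) / 2 : Nat) : Int) + ((n : Int) + 1) := by
      have := pv_tri_step n
      rw [show (n + 1) * (n + 1 + 1) = (n + 1) * (n + 2) from by ring]
      exact_mod_cast this
    rw [hstep]
    push_cast
    ring

-- A's inner loop (list build + sum) rewritten as a map-sum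
theorem pv_inner_build (T s k : Int) :
    ((PySem.List.pyRange 1 (k + 1) 1).foldl (fun l entry => l ++ [T - entry - s + 1]) []).sum
      = ((PySem.List.pyRange 1 (k + 1) 1).map (fun e => (T - s + 1) - e)).sum := by
  rw [PySem.List.foldl_append_singleton_eq_map]
  simp only [List.nil_append]
  congr 1
  exact List.map_congr_left (fun e _ => by ring)

-- B's closed-form body value equals A's inner sum
theorem pv_inner_closed (T s k : Int) :
    ((PySem.List.pyRange 1 (k + 1) 1).foldl (fun l entry => l ++ [T - entry - s + 1]) []).sum
      = if k > 0 then k * (T - s + 1) - PySem.Int.floordiv (k * (k + 1)) 2 else 0 := by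
  rw [pv_inner_build]
  by_cases hk : k > 0
  · simp only [hk, if_true]
    set m := k.toNat with hmdef
    have hk' : k = (m : Int) := by omega
    have hb : k + 1 = 1 + (m : Int) := by omega
    have hfd : PySem.Int.floordiv (k * (k + 1)) 2 = ((m * (m + 1) / 2 : Nat) : Int) := by
      have hcast : k * (k + 1) = ((m * (m + 1) : Nat) : Int) := by rw [hk']; push_cast; ring
      rw [hcast]
      exact_mod_cast PySem.Int.floordiv_natCast (m * (m + 1)) 2
    rw [hfd, hb, pv_sum_tri m (T - s + 1), hk']
  · have h1 : k + 1 ≤ 1 := by omega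
    simp [PySem.List.pyRange_one_eq_nil h1, hk]

-- shift lemma: A's enumerate-fold with rs[e+1] lookups = zip-fold over dropped rs
theorem pv_fold_shift (g : Int → Int → Int) (rs : List Int) :
    ∀ (si : List Int) (n : Int), 0 ≤ n → ∀ (acc : Int),
    (PySem.List.enumerate si n).foldl
        (fun p2 p =>
          if p.1 + 1 < (rs.length : Int) then p2 + g p.2 (PySem.List.pyGetD rs (p.1 + 1) 0)
          else p2) acc
      = (List.zip si (rs.drop (n + 1).toNat)).foldl (fun t p => t + g p.1 p.2) acc := by
  intro si
  induction si with
  | nil => intro n _ acc; simp [PySem.List.enumerate]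
  | cons s si ih =>
    intro n hn acc
    rw [PySem.List.enumerate_cons]
    simp only [List.foldl_cons]
    by_cases h : (n + 1).toNat < rs.length
    · have hd : rs.drop (n + 1).toNat = rs[(n + 1).toNat] :: rs.drop ((n + 1).toNat + 1) := by
        rw [List.drop_eq_getElem_cons h]
      have hget : PySem.List.pyGetD rs (n + 1) 0 = rs[(n + 1).toNat] :=
        PySem.List.pyGetD_eq_getElem rs 0 (by omega) (by omega)
      have hc : (n + 1 < (rs.length : Int)) := by omega
      rw [hd]
      simp only [List.zip_cons_cons, List.foldl_cons, if_pos hc, hget]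
      have hrec := ih (n + 1) (by omega) (acc + g s rs[(n + 1).toNat])
      rw [show (n + 1 + 1).toNat = (n + 1).toNat + 1 by omega] at hrec
      exact hrec
    · have hc : ¬ (n + 1 < (rs.length : Int)) := by omega
      rw [if_neg hc]
      have hrec := ih (n + 1) (by omega) acc
      have hd1 : rs.drop (n + 1).toNat = [] := List.drop_eq_nil_of_le (by omega)
      have hd2 : rs.drop (n + 1 + 1).toNat = [] := List.drop_eq_nil_of_le (by omega)
      rw [hrec, hd1, hd2]
      simp

-- fold with conditional-add body commutes with a shifted initial accumulator
theorem pv_fold_init_add (f h : Int × Int → Int) (c : Int × Int → Prop) [DecidablePred c] :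
    ∀ (l : List (Int × Int)) (a b : Int),
    l.foldl (fun t p => if c p then t + f p - h p else t) (a + b)
      = a + l.foldl (fun t p => if c p then t + f p - h p else t) b := by
  intro l
  induction l with
  | nil => intro a b; simp
  | cons p l ih =>
    intro a b
    simp only [List.foldl_cons]
    by_cases hc : c p
    · simp only [if_pos hc]
      rw [show a + b + f p - h p = a + (b + f p - h p) by ring, ih]
    · simp only [if_neg hc, ih]

-- ===== VERDICT (by name: the statement is the Claim_ definition above) =====
theorem calculate_stone_sum_spec : Claim_equal_calculate_stone_sum := by
  unfold Claim_equal_calculate_stone_sum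
  intro si rs T _
  unfold Spec_calculate_stone_sum calculate_stone_sum calculate_stone_sum_alt
  cases rs with
  | nil => simp
  | cons r0 rest =>
    rw [if_neg (show ¬ ((r0 :: rest).length < 1) from by simp),
      if_neg (show ¬ (r0 :: rest = []) from by simp)]
    -- rewrite A's part_2 via the shift lemma with g = inner sum
    have hshift := pv_fold_shift
      (fun s k => ((PySem.List.pyRange 1 (k + 1) 1).foldl
        (fun l entry => l ++ [T - entry - s + 1]) []).sum)
      (r0 :: rest) si 0 (le_refl 0) 0
    beta_reduce at hshift
    rw [hshift]
    simp only [zero_add, Int.toNat_one, List.drop_succ_cons, List.drop_zero]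
    -- part_1 reindexed to the shape of the inner sum with stone = 0
    have hp1 : ((PySem.List.pyRange 0 (PySem.List.pyGetD (r0 :: rest) 0 0) 1).map
        (fun entry => T - entry)).sum
        = (if r0 > 0 then r0 * (T - 0 + 1) - PySem.Int.floordiv (r0 * (r0 + 1)) 2 else 0) := by
      rw [PySem.List.pyGetD_zero_cons]
      rw [← pv_inner_closed T 0 r0, pv_inner_build]
      rw [PySem.List.pyRange_one 0 r0, PySem.List.pyRange_one 1 (r0 + 1)]
      simp only [List.map_map]
      rw [show (r0 + 1 - 1).toNat = (r0 - 0).toNat by omega]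
      congr 1
      apply List.map_congr_left
      intro j _
      simp only [Function.comp_apply]
      ring
    -- B's fold: first step is the (0, r0) pair, rest is the zip over si/rest
    simp only [List.zip_cons_cons, List.foldl_cons]
    have hzip : (List.zip si rest).foldl
        (fun t p => t + ((PySem.List.pyRange 1 (p.2 + 1) 1).foldl
          (fun l entry => l ++ [T - entry - p.1 + 1]) []).sum) 0
        = (List.zip si rest).foldl
          (fun total p => if p.2 > 0 then
            total + p.2 * (T - p.1 + 1) - PySem.Int.floordiv (p.2 * (p.2 + 1)) 2
          else total) 0 := by
      apply List.foldl_ext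
      intro t p _
      rw [pv_inner_closed T p.1 p.2]
      by_cases h : p.2 > 0
      · simp only [if_pos h]; ring
      · simp [if_neg h]
    rw [hzip]
    by_cases h0 : r0 > 0
    · simp only [hp1, if_pos h0]
      rw [show (0 : Int) + r0 * (T - 0 + 1) - PySem.Int.floordiv (r0 * (r0 + 1)) 2
          = (r0 * (T - 0 + 1) - PySem.Int.floordiv (r0 * (r0 + 1)) 2) + 0 by ring]
      exact congrArg some (pv_fold_init_add (fun p => p.2 * (T - p.1 + 1))
        (fun p => PySem.Int.floordiv (p.2 * (p.2 + 1)) 2)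
        (fun p => p.2 > 0) (List.zip si rest) _ 0).symm
    · simp only [hp1, if_neg h0]
      simp
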